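-- pv_equiv track=rewrite | github.com/Ahjan108/phoenix_omega_v4.8 | phoenix_v4/qa/validate_compiled_plan.py | _validate_emotional_curve
-- ===== SOURCE A (Python) =====
-- def _validate_emotional_curve(
--     dominant_band_sequence: list[int | None],
--     chapter_count: int,
-- ) -> tuple[list[str], list[str]]:
--     """Returns (errors, diagnostics). When chapter_count < 6, add diagnostic 'Skipped: too few chapters'."""
--     errors: list[str] = []
--     diagnostics: list[str] = []
--     if chapter_count < 6:
--         diagnostics.append("Skipped: too few chapters for curve check (need >= 6).")
--         return errors, diagnostics
--
--     bands_in_sequence = [b for b in dominant_band_sequence if b is not None]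
--     distinct_bands = set(bands_in_sequence)
--     if len(distinct_bands) < 3:
--         errors.append(
--             f"Emotional curve invalid: only {len(distinct_bands)} distinct BAND values found "
--             f"(minimum 3 required for books >= 6 chapters)."
--         )
--     max_run = 1
--     current_run = 1
--     for i in range(1, len(dominant_band_sequence)):
--         curr = dominant_band_sequence[i]
--         prev = dominant_band_sequence[i - 1]
--         if curr is not None and prev is not None and curr == prev:
--             current_run += 1
--             max_run = max(max_run, current_run)
--         else:
--             current_run = 1
--     if max_run > 3:
--         errors.append(
--             f"Emotional curve invalid: {max_run} consecutive chapters with same BAND detected (maximum allowed is 3)."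
--         )
--     return errors, diagnostics
-- ===== SOURCE B (Python) =====
-- def _runs(seq):
--     """Run-length encode: [(value, length)] for maximal runs of equal consecutive elements."""
--     runs = []
--     i = 0
--     while i < len(seq):
--         j = i + 1
--         while j < len(seq) and seq[j] == seq[i]:
--             j += 1
--         runs.append((seq[i], j - i))
--         i = j
--     return runs
--
--
-- def _validate_emotional_curve(
--     dominant_band_sequence: list[int | None],
--     chapter_count: int,
-- ) -> tuple[list[str], list[str]]:
--     """Returns (errors, diagnostics). When chapter_count < 6, add diagnostic 'Skipped: too few chapters'."""
--     errors: list[str] = []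
--     diagnostics: list[str] = []
--     if chapter_count < 6:
--         diagnostics.append("Skipped: too few chapters for curve check (need >= 6).")
--         return errors, diagnostics
--
--     distinct_bands = {b for b in dominant_band_sequence if b is not None}
--     if len(distinct_bands) < 3:
--         errors.append(
--             f"Emotional curve invalid: only {len(distinct_bands)} distinct BAND values found "
--             f"(minimum 3 required for books >= 6 chapters)."
--         )
--     max_run = max(
--         (n for k, n in _runs(dominant_band_sequence) if k is not None),
--         default=1,
--     )
--     if max_run > 3:
--         errors.append(
--             f"Emotional curve invalid: {max_run} consecutive chapters with same BAND detected (maximum allowed is 3)."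
--         )
--     return errors, diagnostics
-- ===== Notes on version B (the rewrite author's own statement) =====
-- stated objective: idiomatic
-- what changed: The incremental max-run/current-run counter loop over indices is replaced by a run-length encoding of the sequence (groupby-style maximal runs of equal consecutive elements) followed by max over the lengths of non-None runs with default 1; the distinct-band set check and all messages are unchanged.
import Mathlib
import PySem

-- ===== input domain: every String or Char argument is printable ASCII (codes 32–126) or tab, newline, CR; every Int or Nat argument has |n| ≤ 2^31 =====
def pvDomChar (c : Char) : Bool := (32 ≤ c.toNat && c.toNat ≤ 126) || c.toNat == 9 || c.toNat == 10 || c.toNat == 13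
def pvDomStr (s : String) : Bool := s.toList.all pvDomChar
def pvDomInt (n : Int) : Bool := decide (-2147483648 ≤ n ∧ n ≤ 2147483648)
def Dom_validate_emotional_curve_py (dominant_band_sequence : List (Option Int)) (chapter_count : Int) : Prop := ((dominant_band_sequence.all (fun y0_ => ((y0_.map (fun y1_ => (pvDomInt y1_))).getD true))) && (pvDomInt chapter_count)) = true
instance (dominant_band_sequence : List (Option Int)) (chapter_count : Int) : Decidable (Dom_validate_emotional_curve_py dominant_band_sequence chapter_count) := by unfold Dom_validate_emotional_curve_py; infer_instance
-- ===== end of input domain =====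

-- B replaces A's incremental max-run/current-run counter loop by a run-length encoding
-- (maximal runs of equal consecutive elements) and a max over the non-None run lengths
-- with default 1; objective: idiomatic (groupby-style decomposition), not faster.

-- ===== PORT A =====
def validate_emotional_curve_py (dominant_band_sequence : List (Option Int)) (chapter_count : Int) : List String × List String :=
  let errors : List String := []
  let diagnostics : List String := []
  if chapter_count < 6 then
    (errors, diagnostics ++ ["Skipped: too few chapters for curve check (need >= 6)."])
  else
    -- bands_in_sequence = [b for b in dominant_band_sequence if b is not None]
    let bands_in_sequence : List Int :=
      dominant_band_sequence.foldl (fun acc b => match b with | some v => acc ++ [v] | none => acc) []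
    let distinct_bands : PySem.Set Int := PySem.Set.ofList bands_in_sequence
    let errors :=
      if (distinct_bands.length : Int) < 3 then
        errors ++ ["Emotional curve invalid: only " ++ PySem.Int.toStr (distinct_bands.length : Int) ++
          " distinct BAND values found (minimum 3 required for books >= 6 chapters)."]
      else errors
    -- for i in range(1, len(seq)): …  with state (max_run, current_run)
    let st :=
      (PySem.List.pyRange 1 (dominant_band_sequence.length : Int) 1).foldl
        (fun (st : Int × Int) i =>
          let curr := PySem.List.pyGetD dominant_band_sequence i none
          let prev := PySem.List.pyGetD dominant_band_sequence (i - 1) none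
          match curr, prev with
          | some c, some p => if c = p then (max st.1 (st.2 + 1), st.2 + 1) else (st.1, 1)
          | _, _ => (st.1, 1))
        (1, 1)
    let max_run := st.1
    let errors :=
      if max_run > 3 then
        errors ++ ["Emotional curve invalid: " ++ PySem.Int.toStr max_run ++
          " consecutive chapters with same BAND detected (maximum allowed is 3)."]
      else errors
    (errors, diagnostics)

-- ===== PORT B =====
-- _runs: run-length encoding, peeling one maximal run of equal consecutive elements per step
def pvRuns (seq : List (Option Int)) : List (Option Int × Int) :=
  match seq with
  | [] => []
  | x :: xs =>
    ((x, ((xs.takeWhile (fun y => y == x)).length : Int) + 1)) :: pvRuns (xs.dropWhile (fun y => y == x))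
termination_by seq.length
decreasing_by
  simpa using Nat.lt_succ_of_le (List.length_dropWhile_le _ _)

def validate_emotional_curve_py_alt (dominant_band_sequence : List (Option Int)) (chapter_count : Int) : List String × List String :=
  if chapter_count < 6 then
    ([], ["Skipped: too few chapters for curve check (need >= 6)."])
  else
    let distinct_bands : PySem.Set Int := PySem.Set.ofList (dominant_band_sequence.filterMap id)
    let errors :=
      if (distinct_bands.length : Int) < 3 then
        ["Emotional curve invalid: only " ++ PySem.Int.toStr (distinct_bands.length : Int) ++
          " distinct BAND values found (minimum 3 required for books >= 6 chapters)."]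
      else []
    -- max((n for k, n in _runs(seq) if k is not None), default=1)
    let max_run :=
      PySem.List.maxD
        ((pvRuns dominant_band_sequence).filterMap (fun kn => if kn.1.isSome then some kn.2 else none))
        (fun n => n) 1
    let errors :=
      if max_run > 3 then
        errors ++ ["Emotional curve invalid: " ++ PySem.Int.toStr max_run ++
          " consecutive chapters with same BAND detected (maximum allowed is 3)."]
      else errors
    (errors, [])

-- ===== PRECONDITION & SPEC =====
def Spec_validate_emotional_curve_py (dominant_band_sequence : List (Option Int)) (chapter_count : Int) (out : List String × List String) : Prop := out = validate_emotional_curve_py_alt dominant_band_sequence chapter_count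
instance (dominant_band_sequence : List (Option Int)) (chapter_count : Int) (out : List String × List String) : Decidable (Spec_validate_emotional_curve_py dominant_band_sequence chapter_count out) := by unfold Spec_validate_emotional_curve_py; infer_instance

-- ===== CLAIM (what is proved, stated in full; the proofs are below) =====
def Claim_equal_validate_emotional_curve_py : Prop := ∀ (dominant_band_sequence : List (Option Int)) (chapter_count : Int), Dom_validate_emotional_curve_py dominant_band_sequence chapter_count → Spec_validate_emotional_curve_py dominant_band_sequence chapter_count (validate_emotional_curve_py dominant_band_sequence chapter_count)

-- ===== LEMMAS AND PROOFS =====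

-- A's loop body as a function of (prev, curr)
def pvStepA (st : Int × Int) (p : Option Int × Option Int) : Int × Int :=
  match p.2, p.1 with
  | some c, some q => if c = q then (max st.1 (st.2 + 1), st.2 + 1) else (st.1, 1)
  | _, _ => (st.1, 1)

-- A's loop as structural recursion over the tail, carrying the previous element
def pvLoopA : Option Int → Int × Int → List (Option Int) → Int × Int
  | _, st, [] => st
  | x, st, c :: t => pvLoopA c (pvStepA st (x, c)) t

-- lengths of the non-None runs
def pvRunLens (l : List (Option Int)) : List Int :=
  (pvRuns l).filterMap (fun kn => if kn.1.isSome then some kn.2 else none)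

def pvRunsMax (l : List (Option Int)) (a : Int) : Int :=
  (pvRunLens l).foldl max a

lemma pv_comprehension (xs : List (Option Int)) (acc : List Int) :
    xs.foldl (fun acc b => match b with | some v => acc ++ [v] | none => acc) acc
      = acc ++ xs.filterMap id := by
  induction xs generalizing acc with
  | nil => simp
  | cons b t ih => cases b <;> simp [ih]

lemma pv_pairMap (xs : List (Option Int)) :
    (PySem.List.pyRange 1 (xs.length : Int) 1).map
      (fun i => ((PySem.List.pyGetD xs (i - 1) none : Option Int), PySem.List.pyGetD xs i none))
      = xs.zip xs.tail := by
  apply List.ext_getElem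
  · simp [PySem.List.length_pyRange_one]
  · intro k h1 h2
    simp only [List.getElem_map, PySem.List.getElem_pyRange_one, List.getElem_zip]
    have hk : k < xs.length - 1 := by
      simpa [PySem.List.length_pyRange_one] using h1
    have e1 : (1 : Int) + k - 1 = (k : Int) := by omega
    have e2 : (1 : Int) + k = ((k + 1 : Nat) : Int) := by push_cast; omega
    rw [e1, e2, PySem.List.pyGetD_natCast, PySem.List.pyGetD_natCast]
    have hkl : k < xs.length := by omega
    have hk1 : k + 1 < xs.length := by omega
    simp [List.getD_eq_getElem?_getD, List.getElem?_eq_getElem hkl,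
      List.getElem?_eq_getElem hk1, List.getElem_tail]

lemma pv_zip_foldl (t : List (Option Int)) :
    ∀ (x : Option Int) (st : Int × Int),
      ((x :: t).zip t).foldl pvStepA st = pvLoopA x st t := by
  induction t with
  | nil => intro x st; rfl
  | cons c t' ih => intro x st; simpa [List.zip, pvLoopA] using ih c (pvStepA st (x, c))

lemma pv_runLens_nil : pvRunLens [] = [] := by
  simp [pvRunLens, pvRuns]

lemma pv_runLens_none (t : List (Option Int)) :
    pvRunLens ((none : Option Int) :: t) = pvRunLens t := by
  cases t with
  | nil => simp [pvRunLens, pvRuns]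
  | cons c t' =>
    cases c with
    | none =>
      rw [pvRunLens, pvRuns]
      rw [pvRunLens, pvRuns]
      simp [List.takeWhile, List.dropWhile]
    | some w =>
      rw [pvRunLens, pvRuns]
      simp [List.takeWhile, List.dropWhile]
      rfl

lemma pv_runLens_some (w : Int) (t : List (Option Int)) :
    pvRunLens (some w :: t)
      = (((t.takeWhile (fun y => y == some w)).length : Int) + 1)
          :: pvRunLens (t.dropWhile (fun y => y == some w)) := by
  rw [pvRunLens, pvRuns]
  simp [pvRunLens]

lemma pv_runsMax_some (w : Int) (t : List (Option Int)) (a : Int) :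
    pvRunsMax (some w :: t) a
      = pvRunsMax (t.dropWhile (fun y => y == some w))
          (max a (((t.takeWhile (fun y => y == some w)).length : Int) + 1)) := by
  simp [pvRunsMax, pv_runLens_some]

lemma pv_runsMax_none (t : List (Option Int)) (a : Int) :
    pvRunsMax ((none : Option Int) :: t) a = pvRunsMax t a := by
  simp [pvRunsMax, pv_runLens_none]

lemma pv_loopA_eq (t : List (Option Int)) :
    ∀ (x : Option Int) (mr cr : Int), 1 ≤ mr → 1 ≤ cr →
      (pvLoopA x (mr, cr) t).1 =
        match x with
        | none => pvRunsMax t mr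
        | some v =>
            pvRunsMax (t.dropWhile (fun y => y == some v))
              (if (t.takeWhile (fun y => y == some v)).length = 0 then mr
               else max mr (cr + ((t.takeWhile (fun y => y == some v)).length : Int))) := by
  induction t with
  | nil =>
    intro x mr cr hmr hcr
    cases x <;> simp [pvLoopA, pvRunsMax, pv_runLens_nil]
  | cons c t' ih =>
    intro x mr cr hmr hcr
    cases x with
    | none =>
      -- step resets: pvStepA (mr,cr) (none, c) = (mr, 1)
      cases c with
      | none =>
        have := ih none mr 1 hmr le_rfl
        simpa [pvLoopA, pvStepA, pv_runsMax_none] using this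
      | some w =>
        have h := ih (some w) mr 1 hmr le_rfl
        rw [pvLoopA]
        show (pvLoopA (some w) (mr, 1) t').1 = pvRunsMax (some w :: t') mr
        rw [h, pv_runsMax_some]
        by_cases hg : (t'.takeWhile (fun y => y == some w)).length = 0
        · simp [hg, max_eq_left hmr]
        · have : max mr (1 + ((t'.takeWhile (fun y => y == some w)).length : Int))
              = max mr (((t'.takeWhile (fun y => y == some w)).length : Int) + 1) := by
            ring_nf
          simp [hg, this]
    | some v =>
      cases c with
      | none =>
        have h := ih none mr 1 hmr le_rfl
        rw [pvLoopA]
        show (pvLoopA none (mr, 1) t').1 = _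
        rw [h]
        simp [List.takeWhile, List.dropWhile, pv_runsMax_none]
      | some w =>
        by_cases hvw : w = v
        · subst hvw
          have h := ih (some w) (max mr (cr + 1)) (cr + 1) (le_trans hmr (le_max_left _ _)) (by omega)
          rw [pvLoopA]
          have hstep : pvStepA (mr, cr) (some w, some w) = (max mr (cr + 1), cr + 1) := by
            simp [pvStepA]
          rw [hstep, h]
          simp only [List.takeWhile, List.dropWhile, beq_self_eq_true, List.length_cons]
          by_cases hg : (t'.takeWhile (fun y => y == some w)).length = 0
          · simp [hg]
          · simp only [hg, Nat.succ_ne_zero, if_false]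
            congr 1
            rw [max_assoc]
            congr 1
            have h1 : (cr + 1 : Int) ≤ cr + 1 + ((t'.takeWhile (fun y => y == some w)).length : Int) := by
              have : (0 : Int) ≤ ((t'.takeWhile (fun y => y == some w)).length : Int) := Int.natCast_nonneg _
              omega
            rw [max_eq_right h1]
            push_cast
            omega
        · have h := ih (some w) mr 1 hmr le_rfl
          rw [pvLoopA]
          have hstep : pvStepA (mr, cr) (some v, some w) = (mr, 1) := by
            simp [pvStepA, hvw]
          rw [hstep, h]
          have hne : ((some w : Option Int) == some v) = false := by
            simp [hvw]
          simp only [List.takeWhile, List.dropWhile, hne, List.length_nil]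
          rw [pv_runsMax_some]
          by_cases hg : (t'.takeWhile (fun y => y == some w)).length = 0
          · simp [hg, max_eq_left hmr]
          · have : max mr (1 + ((t'.takeWhile (fun y => y == some w)).length : Int))
                = max mr (((t'.takeWhile (fun y => y == some w)).length : Int) + 1) := by
              ring_nf
            simp [hg, this]

lemma pv_runLens_pos (l : List (Option Int)) : ∀ y ∈ pvRunLens l, 1 ≤ y := by
  induction l using pvRuns.induct with
  | case1 => simp [pv_runLens_nil]
  | case2 x xs ih =>
    cases x with
    | none =>
      have he : pvRunLens ((none : Option Int) :: xs)
          = pvRunLens (xs.dropWhile (fun y => y == (none : Option Int))) := by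
        rw [pvRunLens, pvRuns]; simp [pvRunLens]
      intro y hy
      rw [he] at hy
      exact ih y hy
    | some v =>
      intro y hy
      rw [pv_runLens_some] at hy
      rcases List.mem_cons.mp hy with h | h
      · subst h; omega
      · exact ih y h

lemma pv_maxD_pos (L : List Int) (h : ∀ y ∈ L, 1 ≤ y) :
    PySem.List.maxD L (fun n => n) 1 = L.foldl max 1 := by
  cases L with
  | nil => rfl
  | cons x t =>
    have hx : (1 : Int) ≤ x := h x (by simp)
    rw [PySem.List.maxD, PySem.List.max?_id_cons]
    simp [List.foldl, max_eq_right hx]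

-- ===== VERDICT (by name: the statement is the Claim_ definition above) =====
theorem validate_emotional_curve_py_spec : Claim_equal_validate_emotional_curve_py := by
  intro xs cc _
  unfold Spec_validate_emotional_curve_py
  by_cases hcc : cc < 6
  · simp [validate_emotional_curve_py, validate_emotional_curve_py_alt, hcc]
  · -- the distinct-band lists agree
    have hbands :
        xs.foldl (fun acc b => match b with | some v => acc ++ [v] | none => acc) ([] : List Int)
          = xs.filterMap id := by
      simpa using pv_comprehension xs []
    -- the max-run values agree
    have hmax :
        ((PySem.List.pyRange 1 (xs.length : Int) 1).foldl
          (fun (st : Int × Int) i =>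
            let curr := PySem.List.pyGetD xs i none
            let prev := PySem.List.pyGetD xs (i - 1) none
            match curr, prev with
            | some c, some p => if c = p then (max st.1 (st.2 + 1), st.2 + 1) else (st.1, 1)
            | _, _ => (st.1, 1))
          (1, 1)).1
        = PySem.List.maxD
            ((pvRuns xs).filterMap (fun kn => if kn.1.isSome then some kn.2 else none))
            (fun n => n) 1 := by
      have hfold :
          (PySem.List.pyRange 1 (xs.length : Int) 1).foldl
            (fun (st : Int × Int) i =>
              let curr := PySem.List.pyGetD xs i none
              let prev := PySem.List.pyGetD xs (i - 1) none
              match curr, prev with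
              | some c, some p => if c = p then (max st.1 (st.2 + 1), st.2 + 1) else (st.1, 1)
              | _, _ => (st.1, 1))
            (1, 1)
          = (xs.zip xs.tail).foldl pvStepA (1, 1) := by
        rw [← pv_pairMap xs, List.foldl_map]
        rfl
      rw [hfold]
      show (List.foldl pvStepA (1, 1) (xs.zip xs.tail)).1
          = PySem.List.maxD (pvRunLens xs) (fun n => n) 1
      rw [pv_maxD_pos _ (pv_runLens_pos xs)]
      cases xs with
      | nil => simp [pv_runLens_nil]
      | cons h t =>
        simp only [List.tail_cons]
        rw [pv_zip_foldl t h (1, 1), pv_loopA_eq t h 1 1 le_rfl le_rfl]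
        cases h with
        | none =>
          show pvRunsMax t 1 = List.foldl max 1 (pvRunLens (none :: t))
          rw [pvRunsMax, pv_runLens_none]
        | some v =>
          rw [show (pvRunLens (some v :: t)).foldl max 1 = pvRunsMax (some v :: t) 1 from rfl,
            pv_runsMax_some]
          by_cases hg : (t.takeWhile (fun y => y == some v)).length = 0
          · simp [hg, pvRunsMax]
          · simp only [hg, if_false]
            congr 1
            omega
    simp only [validate_emotional_curve_py, validate_emotional_curve_py_alt, if_neg hcc, hbands,
      hmax, List.nil_append]
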